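-- pv_equiv track=rewrite | github.com/mechauk418/BOJ | 프로그래머스/lv3/92344. 파괴되지 않은 건물/파괴되지 않은 건물.py | solution
-- ===== SOURCE A (Python) =====
-- def solution(board, skill):
--     answer = 0
--     N = len(board)
--     M = len(board[0])
--     graph =[  [ 0 for _ in range(M+1) ] for _ in range(N+1)]
--
--     for s in skill:
--
--         if s[0]==1:
--             dgree = -s[5]
--         else:
--             dgree = s[5]
--         graph[s[1]][s[2]] += dgree
--         graph[s[3]+1][s[2]] -= dgree
--         graph[s[1]][s[4]+1] -= dgree
--         graph[s[3]+1][s[4]+1] += dgree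
--
--     for i in range(N+1):
--         for j in range(1,M+1):
--             graph[i][j] += graph[i][j-1]
--
--     for j in range(M+1):
--         for i in range(1,N+1):
--             graph[i][j] += graph[i-1][j]
--
--
--     for i in range(N):
--         for j in range(M):
--             board[i][j]+=graph[i][j]
--             if board[i][j]>0:
--                 answer +=1
--
--     return answer
-- ===== SOURCE B (Python) =====
-- def solution(board, skill):
--     # Direct rectangle updates instead of a difference array + prefix sums.
--     # Mutates board in place, exactly like the original.
--     for s in skill:
--         degree = -s[5] if s[0] == 1 else s[5]
--         for i in range(s[1], s[3] + 1):
--             for j in range(s[2], s[4] + 1):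
--                 board[i][j] += degree
--     answer = 0
--     for i in range(len(board)):
--         for j in range(len(board[0])):
--             if board[i][j] > 0:
--                 answer += 1
--     return answer
-- ===== Notes on version B (the rewrite author's own statement) =====
-- stated objective: simpler
-- what changed: Replaced the 2-D difference array with its two prefix-sum passes by applying each skill directly to its board rectangle and then one counting scan; Pre_ restricts to the problem's natural domain (nonempty board, rows at least as long as row 0, skills 6-tuples with 0 <= r1 <= r2 < N and 0 <= c1 <= c2 < len(board[0])), excluding inputs where A raises IndexError or where A's value comes from Python negative-index wraparound or an inverted rectangle r1 > r2 of its difference-array bookkeeping.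
-- outside the precondition, e.g. on solution([[1], [1], [1]], [[2, 2, 0, 0, 0, 5]]): A returns 2, B returns 3; on solution([[1, 1], [1, 1]], [[1, -1, 0, 0, 0, 3]]): A returns 4, B returns 2
import Mathlib
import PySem

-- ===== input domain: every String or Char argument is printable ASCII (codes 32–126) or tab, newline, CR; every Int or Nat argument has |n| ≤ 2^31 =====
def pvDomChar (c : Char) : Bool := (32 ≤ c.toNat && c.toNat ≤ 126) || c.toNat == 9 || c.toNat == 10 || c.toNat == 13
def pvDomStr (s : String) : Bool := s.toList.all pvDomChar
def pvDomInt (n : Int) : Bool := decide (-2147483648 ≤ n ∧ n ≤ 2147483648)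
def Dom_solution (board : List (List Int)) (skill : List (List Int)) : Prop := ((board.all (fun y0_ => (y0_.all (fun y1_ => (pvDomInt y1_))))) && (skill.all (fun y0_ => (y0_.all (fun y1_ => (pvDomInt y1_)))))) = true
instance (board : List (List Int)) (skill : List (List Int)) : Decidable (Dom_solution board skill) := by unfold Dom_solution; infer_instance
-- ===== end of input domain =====

-- B replaces A's 2-D difference array + two prefix-sum passes by applying each skill directly to its
-- board rectangle, then one counting scan (equal return value on Pre_; both Pythons mutate `board` in place).


-- ===== PORT A =====
-- g[i][j] (read) and g[i][j] += v (write), via the Python-exact pyGetD/pySetD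
-- (exact wherever the index is non-negative and in range, which Pre_solution guarantees).
def pvAt (g : List (List Int)) (i j : Int) : Int :=
  PySem.List.pyGetD (PySem.List.pyGetD g i []) j 0

def pvAdd (g : List (List Int)) (i j v : Int) : List (List Int) :=
  PySem.List.pySetD g i (PySem.List.pySetD (PySem.List.pyGetD g i []) j (pvAt g i j + v))

-- body of A's `for s in skill:` loop (the four difference-array corner updates)
def stepSkillA (g : List (List Int)) (s : List Int) : List (List Int) :=
  let dgree : Int := if PySem.List.pyGetD s 0 0 = 1 then -PySem.List.pyGetD s 5 0 else PySem.List.pyGetD s 5 0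
  let g1 := pvAdd g (PySem.List.pyGetD s 1 0) (PySem.List.pyGetD s 2 0) dgree
  let g2 := pvAdd g1 (PySem.List.pyGetD s 3 0 + 1) (PySem.List.pyGetD s 2 0) (-dgree)
  let g3 := pvAdd g2 (PySem.List.pyGetD s 1 0) (PySem.List.pyGetD s 4 0 + 1) (-dgree)
  pvAdd g3 (PySem.List.pyGetD s 3 0 + 1) (PySem.List.pyGetD s 4 0 + 1) dgree

-- body of A's row-prefix loop: `for j in range(1, M+1): graph[i][j] += graph[i][j-1]`
def rowPass (M : Nat) (g : List (List Int)) (i : Int) : List (List Int) :=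
  (PySem.List.pyRange 1 ((M : Int) + 1) 1).foldl (fun g j => pvAdd g i j (pvAt g i (j - 1))) g

-- body of A's column-prefix loop: `for i in range(1, N+1): graph[i][j] += graph[i-1][j]`
def colPass (N : Nat) (g : List (List Int)) (j : Int) : List (List Int) :=
  (PySem.List.pyRange 1 ((N : Int) + 1) 1).foldl (fun g i => pvAdd g i j (pvAt g (i - 1) j)) g

-- body of A's final loop: `board[i][j] += graph[i][j]; if board[i][j] > 0: answer += 1`
def countRowA (graph : List (List Int)) (M : Nat) (st : List (List Int) × Int) (i : Int) : List (List Int) × Int :=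
  (PySem.List.pyRange 0 (M : Int) 1).foldl (fun st j =>
    let b := pvAdd st.1 i j (pvAt graph i j)
    (b, if pvAt b i j > 0 then st.2 + 1 else st.2)) st

-- Python raises IndexError at `board[0]` on an empty board; Pre_solution excludes it,
-- so pyGetD's default is never reached.
def solution (board : List (List Int)) (skill : List (List Int)) : Int :=
  let N := board.length
  let M := (PySem.List.pyGetD board 0 []).length
  let graph0 := List.replicate (N + 1) (List.replicate (M + 1) (0 : Int))
  let graph1 := skill.foldl stepSkillA graph0
  let graph2 := (PySem.List.pyRange 0 ((N : Int) + 1) 1).foldl (rowPass M) graph1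
  let graph3 := (PySem.List.pyRange 0 ((M : Int) + 1) 1).foldl (colPass N) graph2
  ((PySem.List.pyRange 0 (N : Int) 1).foldl (countRowA graph3 M) (board, 0)).2

-- ===== PORT B =====
-- body of B's `for s in skill:` loop: add `degree` to every cell of the skill's rectangle
def stepSkillB (b : List (List Int)) (s : List Int) : List (List Int) :=
  let degree : Int := if PySem.List.pyGetD s 0 0 = 1 then -PySem.List.pyGetD s 5 0 else PySem.List.pyGetD s 5 0
  (PySem.List.pyRange (PySem.List.pyGetD s 1 0) (PySem.List.pyGetD s 3 0 + 1) 1).foldl (fun b i =>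
    (PySem.List.pyRange (PySem.List.pyGetD s 2 0) (PySem.List.pyGetD s 4 0 + 1) 1).foldl (fun b j =>
      pvAdd b i j degree) b) b

def solution_alt (board : List (List Int)) (skill : List (List Int)) : Int :=
  let b := skill.foldl stepSkillB board
  (PySem.List.pyRange 0 (b.length : Int) 1).foldl (fun a i =>
    (PySem.List.pyRange 0 ((PySem.List.pyGetD b 0 []).length : Int) 1).foldl (fun a j =>
      if pvAt b i j > 0 then a + 1 else a) a) 0

-- ===== PRECONDITION & SPEC =====
-- Pre_solution restricts to the problem's natural domain: a nonempty board whose rows are at least as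
-- long as row 0, and skills that are 6-tuples [type,r1,c1,r2,c2,degree] with 0 ≤ r1 ≤ r2 < len(board)
-- and 0 ≤ c1 ≤ c2 < len(board[0]); outside it A raises IndexError, or returns accidental values of its
-- difference-array bookkeeping (Python negative-index wraparound, inverted rectangles r1 > r2).
def Pre_solution (board : List (List Int)) (skill : List (List Int)) : Prop :=
  board ≠ [] ∧
  (∀ row ∈ board, (board.headD []).length ≤ row.length) ∧
  ∀ s ∈ skill, 6 ≤ s.length ∧
    0 ≤ s.getD 1 0 ∧ s.getD 1 0 ≤ s.getD 3 0 ∧ s.getD 3 0 < (board.length : Int) ∧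
    0 ≤ s.getD 2 0 ∧ s.getD 2 0 ≤ s.getD 4 0 ∧ s.getD 4 0 < ((board.headD []).length : Int)
instance (board : List (List Int)) (skill : List (List Int)) : Decidable (Pre_solution board skill) := by
  unfold Pre_solution; infer_instance

def pvWitness_solution : List (List Int) × List (List Int) := ([[1], [0]], [[1, 0, 0, 1, 0, 2]])

def Spec_solution (board : List (List Int)) (skill : List (List Int)) (out : Int) : Prop := out = solution_alt board skill
instance (board : List (List Int)) (skill : List (List Int)) (out : Int) : Decidable (Spec_solution board skill out) := by unfold Spec_solution; infer_instance

-- ===== CLAIM (what is proved, stated in full; the proofs are below) =====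
def Claim_equal_solution : Prop := ∀ (board : List (List Int)) (skill : List (List Int)), Dom_solution board skill → Pre_solution board skill → Spec_solution board skill (solution board skill)

-- ===== LEMMAS AND PROOFS =====

-- cell value and row lengths of a list-of-lists
def g2v (g : List (List Int)) (i j : Nat) : Int := (g.getD i []).getD j 0
def rowLens (g : List (List Int)) : List Nat := g.map (·.length)

def degOf (s : List Int) : Int := if s.getD 0 0 = 1 then -s.getD 5 0 else s.getD 5 0
def rectC (s : List Int) (i j : Nat) : Int :=
  if s.getD 1 0 ≤ (i : Int) ∧ (i : Int) ≤ s.getD 3 0 ∧ s.getD 2 0 ≤ (j : Int) ∧ (j : Int) ≤ s.getD 4 0 then degOf s else 0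
def e1C (s : List Int) (i : Nat) : Int :=
  (if (i : Int) = s.getD 1 0 then 1 else 0) - (if (i : Int) = s.getD 3 0 + 1 then 1 else 0)
def e2C (s : List Int) (j : Nat) : Int :=
  (if (j : Int) = s.getD 2 0 then 1 else 0) - (if (j : Int) = s.getD 4 0 + 1 then 1 else 0)
def cornC (s : List Int) (i j : Nat) : Int := degOf s * e1C s i * e2C s j
def deltaOf (sk : List (List Int)) (i j : Nat) : Int := (sk.map (fun s => rectC s i j)).sum
def cornOf (sk : List (List Int)) (i j : Nat) : Int := (sk.map (fun s => cornC s i j)).sum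
def Bnd (N M : Nat) (s : List Int) : Prop :=
  0 ≤ s.getD 1 0 ∧ s.getD 1 0 ≤ s.getD 3 0 ∧ s.getD 3 0 < (N : Int) ∧
  0 ≤ s.getD 2 0 ∧ s.getD 2 0 ≤ s.getD 4 0 ∧ s.getD 4 0 < (M : Int)

lemma rowLens_getD (g : List (List Int)) (i : Nat) :
    (rowLens g).getD i 0 = (g.getD i []).length := by
  simp only [rowLens, List.getD, List.getElem?_map]
  cases g[i]? <;> simp

lemma rowLens_length (g : List (List Int)) : (rowLens g).length = g.length := by
  simp [rowLens]

lemma rowLens_facts (b0 b : List (List Int)) (h : rowLens b = rowLens b0) :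
    b.length = b0.length ∧ ∀ t : Nat, (b.getD t []).length = (b0.getD t []).length := by
  constructor
  · have := congrArg List.length h
    simpa [rowLens_length] using this
  · intro t
    rw [← rowLens_getD, ← rowLens_getD, h]

lemma headD_eq_getD (g : List (List Int)) : g.headD [] = g.getD 0 [] := by
  cases g <;> simp

lemma rowlen_of (g : List (List Int)) (N M : Nat)
    (hL : rowLens g = List.replicate (N + 1) (M + 1)) :
    g.length = N + 1 ∧ ∀ t : Nat, t < N + 1 → (g.getD t []).length = M + 1 := by
  constructor
  · have := congrArg List.length hL
    simpa [rowLens_length] using this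
  · intro t ht
    have h := rowLens_getD g t
    rw [hL] at h
    rw [← h, List.getD_eq_getElem _ 0 (by simpa using ht)]
    simp


-- pvAt reads exactly the (i,j) cell (indices non-negative and in range)
lemma pvAt_spec (g : List (List Int)) (i j : Int) (hi0 : 0 ≤ i) (hi : i.toNat < g.length)
    (hj0 : 0 ≤ j) (hj : j.toNat < (g.getD i.toNat []).length) :
    pvAt g i j = g2v g i.toNat j.toNat := by
  have hrow : g.getD i.toNat [] = g[i.toNat]'hi := List.getD_eq_getElem g [] hi
  unfold pvAt g2v
  rw [PySem.List.pyGetD_eq_getElem g [] hi0 (by omega)]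
  rw [hrow] at hj ⊢
  rw [PySem.List.pyGetD_eq_getElem _ 0 hj0 (by omega)]
  rw [List.getD_eq_getElem _ 0 hj]

lemma getD_set_row (g : List (List Int)) (n : Nat) (R : List Int) (hn : n < g.length) (i : Nat) :
    (g.set n R).getD i [] = if i = n then R else g.getD i [] := by
  rw [List.getD_eq_getElem?_getD, List.getElem?_set]
  by_cases h : n = i
  · subst h; simp [hn]
  · rw [if_neg h, ← List.getD_eq_getElem?_getD, if_neg (fun hh => h hh.symm)]

lemma getD_set_val (r : List Int) (n : Nat) (x : Int) (hn : n < r.length) (j : Nat) :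
    (r.set n x).getD j 0 = if j = n then x else r.getD j 0 := by
  rw [List.getD_eq_getElem?_getD, List.getElem?_set]
  by_cases h : n = j
  · subst h; simp [hn]
  · rw [if_neg h, ← List.getD_eq_getElem?_getD, if_neg (fun hh => h hh.symm)]

-- pvAdd preserves row lengths and changes exactly the (i,j) cell
lemma pvAdd_spec (g : List (List Int)) (p q v : Int) (hp0 : 0 ≤ p) (hp : p.toNat < g.length)
    (hq0 : 0 ≤ q) (hq : q.toNat < (g.getD p.toNat []).length) :
    rowLens (pvAdd g p q v) = rowLens g ∧
    ∀ i j : Nat, g2v (pvAdd g p q v) i j =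
      if i = p.toNat ∧ j = q.toNat then g2v g i j + v else g2v g i j := by
  have hAt : pvAt g p q = g2v g p.toNat q.toNat := pvAt_spec g p q hp0 hp hq0 hq
  have hpv : pvAdd g p q v =
      g.set p.toNat ((g.getD p.toNat []).set q.toNat (g2v g p.toNat q.toNat + v)) := by
    unfold pvAdd
    rw [hAt, PySem.List.pySetD_of_nonneg _ _ hq0,
        PySem.List.pyGetD_eq_getElem g [] hp0 (by omega),
        PySem.List.pySetD_of_nonneg _ _ hp0, List.getD_eq_getElem g [] hp]
  rw [hpv]
  constructor
  · have h1 : ((g.getD p.toNat []).set q.toNat (g2v g p.toNat q.toNat + v)).length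
        = (g.map (·.length))[p.toNat]'(by simpa using hp) := by
      rw [List.length_set, List.getElem_map, List.getD_eq_getElem g [] hp]
    unfold rowLens
    rw [List.map_set, h1, List.set_getElem_self]
  · intro i j
    show g2v _ i j = _
    unfold g2v
    rw [getD_set_row g p.toNat _ hp i]
    by_cases hip : i = p.toNat
    · rw [if_pos hip, getD_set_val _ _ _ hq j]
      by_cases hjq : j = q.toNat
      · rw [if_pos hjq, if_pos ⟨hip, hjq⟩, hip, hjq]
      · rw [if_neg hjq, if_neg (fun hh => hjq hh.2), hip]
    · rw [if_neg hip, if_neg (fun hh => hip hh.1)]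

-- generic loop invariant for `for k in range(a, b)`
lemma foldl_range_inv {σ : Type} (f : σ → Int → σ) (P : Int → σ → Prop) :
    ∀ (n : Nat) (a b : Int) (init : σ), (b - a).toNat = n → a ≤ b → P a init →
      (∀ (k : Int) (s : σ), a ≤ k → k < b → P k s → P (k + 1) (f s k)) →
      P b ((PySem.List.pyRange a b 1).foldl f init) := by
  intro n
  induction n with
  | zero =>
    intro a b init h hab h0 _
    have hba : b = a := by omega
    subst hba
    rw [PySem.List.pyRange_one_eq_nil le_rfl]
    simpa using h0
  | succ n ih =>
    intro a b init h hab h0 hstep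
    have hlt : a < b := by omega
    rw [PySem.List.pyRange_one_cons hlt]
    simp only [List.foldl_cons]
    exact ih (a + 1) b (f init a) (by omega) (by omega)
      (hstep a init le_rfl hlt h0) (fun k s hk hk' => hstep k s (by omega) hk')

lemma foldl_range_inv' {σ : Type} (f : σ → Int → σ) (P : Int → σ → Prop) (a b : Int)
    (init : σ) (hab : a ≤ b) (h0 : P a init)
    (hstep : ∀ (k : Int) (s : σ), a ≤ k → k < b → P k s → P (k + 1) (f s k)) :
    P b ((PySem.List.pyRange a b 1).foldl f init) :=
  foldl_range_inv f P (b - a).toNat a b init rfl hab h0 hstep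

-- indicator sum
lemma sum_ind (n : Nat) (c : Int) :
    (∑ t ∈ Finset.range n, if (t : Int) = c then (1 : Int) else 0) =
      if 0 ≤ c ∧ c < (n : Int) then 1 else 0 := by
  induction n with
  | zero =>
    have h : ¬(0 ≤ c ∧ c < ((0 : Nat) : Int)) := by omega
    simp only [Finset.range_zero, Finset.sum_empty, if_neg h]
  | succ n ih =>
    rw [Finset.sum_range_succ, ih]
    have hcast : ((n + 1 : Nat) : Int) = (n : Int) + 1 := by push_cast; ring
    rw [hcast]
    split_ifs <;> omega

-- swap a Finset.range sum with a list sum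
lemma list_sum_swap (sk : List (List Int)) (f : List Int → Nat → Int) (n : Nat) :
    (∑ t ∈ Finset.range n, (sk.map (fun s => f s t)).sum) =
      (sk.map (fun s => ∑ t ∈ Finset.range n, f s t)).sum := by
  induction sk with
  | nil => simp
  | cons s tl ih => simp [Finset.sum_add_distrib, ih]

-- pyGetD with a Nat-cast index is plain getD
lemma pyGetD_n (s : List Int) (k : Nat) :
    PySem.List.pyGetD s ((k : Nat) : Int) 0 = s.getD k 0 := PySem.List.pyGetD_natCast s k 0

-- the four corner updates of A's skill step, pointwise
lemma stepA_spec (N M : Nat) (g : List (List Int)) (s : List Int)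
    (hL : rowLens g = List.replicate (N + 1) (M + 1)) (hs : Bnd N M s) :
    rowLens (stepSkillA g s) = List.replicate (N + 1) (M + 1) ∧
    ∀ i j : Nat, g2v (stepSkillA g s) i j = g2v g i j + cornC s i j := by
  obtain ⟨hs1, hs13, hs3, hs2, hs24, hs4⟩ := hs
  have hb0 : PySem.List.pyGetD s 0 0 = s.getD 0 0 := PySem.List.pyGetD_zero s 0
  have hb1 : PySem.List.pyGetD s 1 0 = s.getD 1 0 := by simpa using pyGetD_n s 1
  have hb2 : PySem.List.pyGetD s 2 0 = s.getD 2 0 := by simpa using pyGetD_n s 2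
  have hb3 : PySem.List.pyGetD s 3 0 = s.getD 3 0 := by simpa using pyGetD_n s 3
  have hb4 : PySem.List.pyGetD s 4 0 = s.getD 4 0 := by simpa using pyGetD_n s 4
  have hb5 : PySem.List.pyGetD s 5 0 = s.getD 5 0 := by simpa using pyGetD_n s 5
  have hstep : stepSkillA g s =
      pvAdd (pvAdd (pvAdd (pvAdd g (s.getD 1 0) (s.getD 2 0) (degOf s))
          (s.getD 3 0 + 1) (s.getD 2 0) (-degOf s))
        (s.getD 1 0) (s.getD 4 0 + 1) (-degOf s))
      (s.getD 3 0 + 1) (s.getD 4 0 + 1) (degOf s) := by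
    simp only [stepSkillA, degOf, hb0, hb1, hb2, hb3, hb4, hb5]
  have key : ∀ (h : List (List Int)) (p q : Int), rowLens h = List.replicate (N + 1) (M + 1) →
      0 ≤ p → p < (N : Int) + 1 → 0 ≤ q → q < (M : Int) + 1 →
      ∀ v : Int, rowLens (pvAdd h p q v) = List.replicate (N + 1) (M + 1) ∧
      ∀ i j : Nat, g2v (pvAdd h p q v) i j =
        if (i : Int) = p ∧ (j : Int) = q then g2v h i j + v else g2v h i j := by
    intro h p q hLh hp0 hpN hq0 hqM v
    obtain ⟨hlen, hrow⟩ := rowlen_of h N M hLh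
    obtain ⟨w1, w2⟩ := pvAdd_spec h p q v hp0 (by omega) hq0 (by rw [hrow p.toNat (by omega)]; omega)
    refine ⟨by rw [w1, hLh], fun i j => ?_⟩
    rw [w2 i j]
    have hiff : (i = p.toNat ∧ j = q.toNat) ↔ ((i : Int) = p ∧ (j : Int) = q) := by omega
    simp only [hiff]
  obtain ⟨L1, P1⟩ := key g (s.getD 1 0) (s.getD 2 0) hL hs1 (by omega) hs2 (by omega) (degOf s)
  obtain ⟨L2, P2⟩ := key _ (s.getD 3 0 + 1) (s.getD 2 0) L1 (by omega) (by omega) hs2 (by omega) (-degOf s)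
  obtain ⟨L3, P3⟩ := key _ (s.getD 1 0) (s.getD 4 0 + 1) L2 hs1 (by omega) (by omega) (by omega) (-degOf s)
  obtain ⟨L4, P4⟩ := key _ (s.getD 3 0 + 1) (s.getD 4 0 + 1) L3 (by omega) (by omega) (by omega) (by omega) (degOf s)
  rw [hstep]
  refine ⟨L4, fun i j => ?_⟩
  rw [P4 i j, P3 i j, P2 i j, P1 i j]
  unfold cornC e1C e2C
  split_ifs <;> omega

-- A's skill loop
lemma skillsA_spec (N M : Nat) (sk : List (List Int)) :
    ∀ g : List (List Int), rowLens g = List.replicate (N + 1) (M + 1) → (∀ s ∈ sk, Bnd N M s) →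
      rowLens (sk.foldl stepSkillA g) = List.replicate (N + 1) (M + 1) ∧
      ∀ i j : Nat, g2v (sk.foldl stepSkillA g) i j = g2v g i j + cornOf sk i j := by
  induction sk with
  | nil => intro g hL _; exact ⟨hL, fun i j => by simp [cornOf]⟩
  | cons s tl ih =>
    intro g hL hB
    obtain ⟨h1, h2⟩ := stepA_spec N M g s hL (hB s (by simp))
    obtain ⟨h3, h4⟩ := ih (stepSkillA g s) h1 (fun x hx => hB x (by simp [hx]))
    refine ⟨h3, fun i j => ?_⟩
    simp only [List.foldl_cons]
    rw [h4 i j, h2 i j]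
    simp only [cornOf, List.map_cons, List.sum_cons]
    ring1

-- A's row-prefix pass on a single row
lemma rowPass_spec (N M : Nat) (h : List (List Int)) (ii : Int)
    (hL : rowLens h = List.replicate (N + 1) (M + 1)) (hii0 : 0 ≤ ii) (hiiN : ii < (N : Int) + 1) :
    rowLens (rowPass M h ii) = List.replicate (N + 1) (M + 1) ∧
    ∀ i j : Nat, i < N + 1 → j < M + 1 →
      g2v (rowPass M h ii) i j =
        if (i : Int) = ii then ∑ t ∈ Finset.range (j + 1), g2v h i t else g2v h i j := by
  unfold rowPass
  set P : Int → List (List Int) → Prop := fun jj g'' =>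
    rowLens g'' = List.replicate (N + 1) (M + 1) ∧
    ∀ i j : Nat, i < N + 1 → j < M + 1 →
      g2v g'' i j = if (i : Int) = ii ∧ (j : Int) < jj then ∑ t ∈ Finset.range (j + 1), g2v h i t
        else g2v h i j with hP
  have h0 : P 1 h := by
    refine ⟨hL, fun i j hi hj => ?_⟩
    by_cases hc : (i : Int) = ii ∧ (j : Int) < 1
    · have hj0 : j = 0 := by omega
      subst hj0
      rw [if_pos hc, Finset.sum_range_one]
    · rw [if_neg hc]
  have hstep : ∀ (k : Int) (g'' : List (List Int)), 1 ≤ k → k < (M : Int) + 1 → P k g'' →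
      P (k + 1) (pvAdd g'' ii k (pvAt g'' ii (k - 1))) := by
    intro k g'' hk1 hkM hPk
    obtain ⟨hL'', hp⟩ := hPk
    obtain ⟨hlen, hrow⟩ := rowlen_of g'' N M hL''
    have hiit : ii.toNat < N + 1 := by omega
    have hread : pvAt g'' ii (k - 1) = g2v g'' ii.toNat (k - 1).toNat :=
      pvAt_spec g'' ii (k - 1) hii0 (by omega) (by omega) (by rw [hrow ii.toNat hiit]; omega)
    have hreadval : pvAt g'' ii (k - 1) = ∑ t ∈ Finset.range ((k - 1).toNat + 1), g2v h ii.toNat t := by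
      rw [hread, hp ii.toNat (k - 1).toNat hiit (by omega),
        if_pos (show ((ii.toNat : Nat) : Int) = ii ∧ (((k - 1).toNat : Nat) : Int) < k by
          constructor <;> omega)]
    obtain ⟨w1, w2⟩ := pvAdd_spec g'' ii k (pvAt g'' ii (k - 1)) hii0 (by omega) (by omega)
      (by rw [hrow ii.toNat hiit]; omega)
    refine ⟨by rw [w1, hL''], fun i j hi hj => ?_⟩
    rw [w2 i j]
    by_cases hc : i = ii.toNat ∧ j = k.toNat
    · obtain ⟨hci, hcj⟩ := hc
      rw [if_pos ⟨hci, hcj⟩, hreadval, hp i j hi hj,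
          if_neg (show ¬((i : Int) = ii ∧ (j : Int) < k) by omega),
          if_pos (show (i : Int) = ii ∧ (j : Int) < k + 1 by omega)]
      have hkk : (k - 1).toNat + 1 = k.toNat := by omega
      rw [hkk, hci, hcj, Finset.sum_range_succ]
      ring1
    · rw [if_neg hc, hp i j hi hj]
      by_cases hc2 : (i : Int) = ii ∧ (j : Int) < k
      · rw [if_pos hc2, if_pos (show (i : Int) = ii ∧ (j : Int) < k + 1 by omega)]
      · rw [if_neg hc2, if_neg (show ¬((i : Int) = ii ∧ (j : Int) < k + 1) by omega)]
  have final := foldl_range_inv' _ P 1 ((M : Int) + 1) h (by omega) h0 hstep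
  obtain ⟨f1, f2⟩ := final
  refine ⟨f1, fun i j hi hj => ?_⟩
  rw [f2 i j hi hj]
  by_cases hc : (i : Int) = ii
  · rw [if_pos (show (i : Int) = ii ∧ (j : Int) < (M : Int) + 1 by exact ⟨hc, by omega⟩), if_pos hc]
  · rw [if_neg (show ¬((i : Int) = ii ∧ (j : Int) < (M : Int) + 1) from fun hh => hc hh.1), if_neg hc]

-- A's row-prefix loop over all rows
lemma rowPassFold_spec (N M : Nat) (g : List (List Int))
    (hL : rowLens g = List.replicate (N + 1) (M + 1)) :
    rowLens ((PySem.List.pyRange 0 ((N : Int) + 1) 1).foldl (rowPass M) g) = List.replicate (N + 1) (M + 1) ∧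
    ∀ i j : Nat, i < N + 1 → j < M + 1 →
      g2v ((PySem.List.pyRange 0 ((N : Int) + 1) 1).foldl (rowPass M) g) i j =
        ∑ t ∈ Finset.range (j + 1), g2v g i t := by
  set P : Int → List (List Int) → Prop := fun ii g' =>
    rowLens g' = List.replicate (N + 1) (M + 1) ∧
    ∀ i j : Nat, i < N + 1 → j < M + 1 →
      g2v g' i j = if (i : Int) < ii then ∑ t ∈ Finset.range (j + 1), g2v g i t else g2v g i j with hP
  have h0 : P 0 g := ⟨hL, fun i j hi hj => by rw [if_neg (show ¬((i : Int) < 0) by omega)]⟩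
  have hstep : ∀ (k : Int) (g' : List (List Int)), 0 ≤ k → k < (N : Int) + 1 → P k g' →
      P (k + 1) (rowPass M g' k) := by
    intro k g' hk0 hkN hPk
    obtain ⟨hL', hp⟩ := hPk
    obtain ⟨w1, w2⟩ := rowPass_spec N M g' k hL' hk0 hkN
    refine ⟨w1, fun i j hi hj => ?_⟩
    rw [w2 i j hi hj]
    by_cases hc : (i : Int) = k
    · rw [if_pos hc, if_pos (show (i : Int) < k + 1 by omega)]
      refine Finset.sum_congr rfl (fun t ht => ?_)
      have htM : t < M + 1 := by
        have := Finset.mem_range.mp ht; omega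
      rw [hp i t hi htM, if_neg (show ¬((i : Int) < k) by omega)]
    · rw [if_neg hc, hp i j hi hj]
      by_cases hc2 : (i : Int) < k
      · rw [if_pos hc2, if_pos (show (i : Int) < k + 1 by omega)]
      · rw [if_neg hc2, if_neg (show ¬((i : Int) < k + 1) by omega)]
  have final := foldl_range_inv' (rowPass M) P 0 ((N : Int) + 1) g (by omega) h0 hstep
  obtain ⟨f1, f2⟩ := final
  exact ⟨f1, fun i j hi hj => by
    rw [f2 i j hi hj, if_pos (show (i : Int) < (N : Int) + 1 by omega)]⟩

-- A's column-prefix pass on a single column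
lemma colPass_spec (N M : Nat) (h : List (List Int)) (jj : Int)
    (hL : rowLens h = List.replicate (N + 1) (M + 1)) (hjj0 : 0 ≤ jj) (hjjM : jj < (M : Int) + 1) :
    rowLens (colPass N h jj) = List.replicate (N + 1) (M + 1) ∧
    ∀ i j : Nat, i < N + 1 → j < M + 1 →
      g2v (colPass N h jj) i j =
        if (j : Int) = jj then ∑ t ∈ Finset.range (i + 1), g2v h t j else g2v h i j := by
  unfold colPass
  set P : Int → List (List Int) → Prop := fun kk g'' =>
    rowLens g'' = List.replicate (N + 1) (M + 1) ∧
    ∀ i j : Nat, i < N + 1 → j < M + 1 →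
      g2v g'' i j = if (j : Int) = jj ∧ (i : Int) < kk then ∑ t ∈ Finset.range (i + 1), g2v h t j
        else g2v h i j with hP
  have h0 : P 1 h := by
    refine ⟨hL, fun i j hi hj => ?_⟩
    by_cases hc : (j : Int) = jj ∧ (i : Int) < 1
    · have hi0 : i = 0 := by omega
      subst hi0
      rw [if_pos hc, Finset.sum_range_one]
    · rw [if_neg hc]
  have hstep : ∀ (k : Int) (g'' : List (List Int)), 1 ≤ k → k < (N : Int) + 1 → P k g'' →
      P (k + 1) (pvAdd g'' k jj (pvAt g'' (k - 1) jj)) := by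
    intro k g'' hk1 hkN hPk
    obtain ⟨hL'', hp⟩ := hPk
    obtain ⟨hlen, hrow⟩ := rowlen_of g'' N M hL''
    have hread : pvAt g'' (k - 1) jj = g2v g'' (k - 1).toNat jj.toNat :=
      pvAt_spec g'' (k - 1) jj (by omega) (by omega) hjj0
        (by rw [hrow (k - 1).toNat (by omega)]; omega)
    have hreadval : pvAt g'' (k - 1) jj =
        ∑ t ∈ Finset.range ((k - 1).toNat + 1), g2v h t jj.toNat := by
      rw [hread, hp (k - 1).toNat jj.toNat (by omega) (by omega),
        if_pos (show ((jj.toNat : Nat) : Int) = jj ∧ (((k - 1).toNat : Nat) : Int) < k by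
          constructor <;> omega)]
    obtain ⟨w1, w2⟩ := pvAdd_spec g'' k jj (pvAt g'' (k - 1) jj) (by omega) (by omega) hjj0
      (by rw [hrow k.toNat (by omega)]; omega)
    refine ⟨by rw [w1, hL''], fun i j hi hj => ?_⟩
    rw [w2 i j]
    by_cases hc : i = k.toNat ∧ j = jj.toNat
    · obtain ⟨hci, hcj⟩ := hc
      rw [if_pos ⟨hci, hcj⟩, hreadval, hp i j hi hj,
          if_neg (show ¬((j : Int) = jj ∧ (i : Int) < k) by omega),
          if_pos (show (j : Int) = jj ∧ (i : Int) < k + 1 by omega)]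
      have hkk : (k - 1).toNat + 1 = k.toNat := by omega
      rw [hkk, hci, hcj, Finset.sum_range_succ]
      ring1
    · rw [if_neg hc, hp i j hi hj]
      by_cases hc2 : (j : Int) = jj ∧ (i : Int) < k
      · rw [if_pos hc2, if_pos (show (j : Int) = jj ∧ (i : Int) < k + 1 by omega)]
      · rw [if_neg hc2, if_neg (show ¬((j : Int) = jj ∧ (i : Int) < k + 1) by omega)]
  have final := foldl_range_inv' _ P 1 ((N : Int) + 1) h (by omega) h0 hstep
  obtain ⟨f1, f2⟩ := final
  refine ⟨f1, fun i j hi hj => ?_⟩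
  rw [f2 i j hi hj]
  by_cases hc : (j : Int) = jj
  · rw [if_pos (show (j : Int) = jj ∧ (i : Int) < (N : Int) + 1 from ⟨hc, by omega⟩), if_pos hc]
  · rw [if_neg (show ¬((j : Int) = jj ∧ (i : Int) < (N : Int) + 1) from fun hh => hc hh.1), if_neg hc]

-- A's column-prefix loop over all columns
lemma colPassFold_spec (N M : Nat) (g : List (List Int))
    (hL : rowLens g = List.replicate (N + 1) (M + 1)) :
    rowLens ((PySem.List.pyRange 0 ((M : Int) + 1) 1).foldl (colPass N) g) = List.replicate (N + 1) (M + 1) ∧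
    ∀ i j : Nat, i < N + 1 → j < M + 1 →
      g2v ((PySem.List.pyRange 0 ((M : Int) + 1) 1).foldl (colPass N) g) i j =
        ∑ t ∈ Finset.range (i + 1), g2v g t j := by
  set P : Int → List (List Int) → Prop := fun jj g' =>
    rowLens g' = List.replicate (N + 1) (M + 1) ∧
    ∀ i j : Nat, i < N + 1 → j < M + 1 →
      g2v g' i j = if (j : Int) < jj then ∑ t ∈ Finset.range (i + 1), g2v g t j else g2v g i j with hP
  have h0 : P 0 g := ⟨hL, fun i j hi hj => by rw [if_neg (show ¬((j : Int) < 0) by omega)]⟩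
  have hstep : ∀ (k : Int) (g' : List (List Int)), 0 ≤ k → k < (M : Int) + 1 → P k g' →
      P (k + 1) (colPass N g' k) := by
    intro k g' hk0 hkM hPk
    obtain ⟨hL', hp⟩ := hPk
    obtain ⟨w1, w2⟩ := colPass_spec N M g' k hL' hk0 hkM
    refine ⟨w1, fun i j hi hj => ?_⟩
    rw [w2 i j hi hj]
    by_cases hc : (j : Int) = k
    · rw [if_pos hc, if_pos (show (j : Int) < k + 1 by omega)]
      refine Finset.sum_congr rfl (fun t ht => ?_)
      have htN : t < N + 1 := by
        have := Finset.mem_range.mp ht; omega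
      rw [hp t j htN hj, if_neg (show ¬((j : Int) < k) by omega)]
    · rw [if_neg hc, hp i j hi hj]
      by_cases hc2 : (j : Int) < k
      · rw [if_pos hc2, if_pos (show (j : Int) < k + 1 by omega)]
      · rw [if_neg hc2, if_neg (show ¬((j : Int) < k + 1) by omega)]
  have final := foldl_range_inv' (colPass N) P 0 ((M : Int) + 1) g (by omega) h0 hstep
  obtain ⟨f1, f2⟩ := final
  exact ⟨f1, fun i j hi hj => by
    rw [f2 i j hi hj, if_pos (show (j : Int) < (M : Int) + 1 by omega)]⟩

-- A's final loop over one row: mutate the row and count its positive cells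
lemma countRowA_spec (N M : Nat) (graph b : List (List Int)) (a : Int) (ii : Int)
    (hG : rowLens graph = List.replicate (N + 1) (M + 1))
    (hbl : b.length = N) (hbr : ∀ t : Nat, t < N → M ≤ (b.getD t []).length)
    (hii0 : 0 ≤ ii) (hiiN : ii < (N : Int)) :
    rowLens (countRowA graph M (b, a) ii).1 = rowLens b ∧
    (∀ i j : Nat, g2v (countRowA graph M (b, a) ii).1 i j =
      if (i : Int) = ii ∧ (j : Int) < (M : Int) then g2v b i j + g2v graph i j else g2v b i j) ∧
    (countRowA graph M (b, a) ii).2 =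
      a + ∑ j ∈ Finset.range M, (if g2v b ii.toNat j + g2v graph ii.toNat j > 0 then (1 : Int) else 0) := by
  have hdef : countRowA graph M (b, a) ii =
      (PySem.List.pyRange 0 (M : Int) 1).foldl (fun st j =>
        (pvAdd st.1 ii j (pvAt graph ii j),
          if pvAt (pvAdd st.1 ii j (pvAt graph ii j)) ii j > 0 then st.2 + 1 else st.2)) (b, a) := rfl
  rw [hdef]
  obtain ⟨hGlen, hGrow⟩ := rowlen_of graph N M hG
  set P : Int → List (List Int) × Int → Prop := fun jj st =>
    rowLens st.1 = rowLens b ∧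
    (∀ i j : Nat, g2v st.1 i j =
      if (i : Int) = ii ∧ (j : Int) < jj then g2v b i j + g2v graph i j else g2v b i j) ∧
    st.2 = a + ∑ j ∈ Finset.range jj.toNat,
      (if g2v b ii.toNat j + g2v graph ii.toNat j > 0 then (1 : Int) else 0) with hP
  have h0 : P 0 (b, a) := by
    refine ⟨rfl, fun i j => by rw [if_neg (show ¬((i : Int) = ii ∧ (j : Int) < 0) by omega)], by simp⟩
  have hstep : ∀ (k : Int) (st : List (List Int) × Int), 0 ≤ k → k < (M : Int) → P k st →
      P (k + 1) (pvAdd st.1 ii k (pvAt graph ii k),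
        if pvAt (pvAdd st.1 ii k (pvAt graph ii k)) ii k > 0 then st.2 + 1 else st.2) := by
    intro k st hk0 hkM hPk
    obtain ⟨hL', hp, ha⟩ := hPk
    obtain ⟨hlenEq, hrowEq⟩ := rowLens_facts b st.1 hL'
    have hiit : ii.toNat < N := by omega
    have hreadG : pvAt graph ii k = g2v graph ii.toNat k.toNat :=
      pvAt_spec graph ii k hii0 (by omega) hk0 (by rw [hGrow ii.toNat (by omega)]; omega)
    have hrowlen : k.toNat < (st.1.getD ii.toNat []).length := by
      rw [hrowEq ii.toNat]
      have := hbr ii.toNat hiit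
      omega
    obtain ⟨w1, w2⟩ := pvAdd_spec st.1 ii k (pvAt graph ii k) hii0 (by omega) hk0 hrowlen
    have hnewlens : rowLens (pvAdd st.1 ii k (pvAt graph ii k)) = rowLens b := by rw [w1, hL']
    have hreadback : pvAt (pvAdd st.1 ii k (pvAt graph ii k)) ii k =
        g2v b ii.toNat k.toNat + g2v graph ii.toNat k.toNat := by
      obtain ⟨hlenEq2, hrowEq2⟩ := rowLens_facts b _ hnewlens
      rw [pvAt_spec _ ii k hii0 (by omega) hk0
        (by rw [hrowEq2 ii.toNat]; have := hbr ii.toNat hiit; omega)]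
      rw [w2 ii.toNat k.toNat, if_pos ⟨rfl, rfl⟩, hreadG, hp ii.toNat k.toNat,
          if_neg (show ¬(((ii.toNat : Nat) : Int) = ii ∧ ((k.toNat : Nat) : Int) < k) by omega)]
    refine ⟨hnewlens, fun i j => ?_, ?_⟩
    · rw [w2 i j]
      by_cases hc : i = ii.toNat ∧ j = k.toNat
      · obtain ⟨hci, hcj⟩ := hc
        rw [if_pos ⟨hci, hcj⟩, hp i j,
            if_neg (show ¬((i : Int) = ii ∧ (j : Int) < k) by omega),
            if_pos (show (i : Int) = ii ∧ (j : Int) < k + 1 by omega), hreadG, hci, hcj]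
      · rw [if_neg hc, hp i j]
        by_cases hc2 : (i : Int) = ii ∧ (j : Int) < k
        · rw [if_pos hc2, if_pos (show (i : Int) = ii ∧ (j : Int) < k + 1 by omega)]
        · rw [if_neg hc2, if_neg (show ¬((i : Int) = ii ∧ (j : Int) < k + 1) by omega)]
    · rw [hreadback, ha]
      have hkk : (k + 1).toNat = k.toNat + 1 := by omega
      rw [hkk, Finset.sum_range_succ]
      split_ifs <;> ring1
  have final := foldl_range_inv'
    (fun st j => (pvAdd st.1 ii j (pvAt graph ii j),
      if pvAt (pvAdd st.1 ii j (pvAt graph ii j)) ii j > 0 then st.2 + 1 else st.2))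
    P 0 (M : Int) (b, a) (by omega) h0 hstep
  obtain ⟨f1, f2, f3⟩ := final
  refine ⟨f1, fun i j => f2 i j, ?_⟩
  rw [f3]
  simp
-- A's final loop: the answer counts cells with board[i][j] + graph[i][j] > 0
lemma countA_spec (N M : Nat) (graph board : List (List Int))
    (hG : rowLens graph = List.replicate (N + 1) (M + 1))
    (hbl : board.length = N) (hbr : ∀ t : Nat, t < N → M ≤ (board.getD t []).length) :
    ((PySem.List.pyRange 0 (N : Int) 1).foldl (countRowA graph M) (board, 0)).2 =
      ∑ i ∈ Finset.range N, ∑ j ∈ Finset.range M,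
        (if g2v board i j + g2v graph i j > 0 then (1 : Int) else 0) := by
  set P : Int → List (List Int) × Int → Prop := fun ii st =>
    rowLens st.1 = rowLens board ∧
    (∀ i j : Nat, g2v st.1 i j =
      if (i : Int) < ii ∧ (j : Int) < (M : Int) then g2v board i j + g2v graph i j else g2v board i j) ∧
    st.2 = ∑ i ∈ Finset.range ii.toNat, ∑ j ∈ Finset.range M,
      (if g2v board i j + g2v graph i j > 0 then (1 : Int) else 0) with hP
  have h0 : P 0 (board, 0) :=
    ⟨rfl, fun i j => by rw [if_neg (show ¬((i : Int) < 0 ∧ (j : Int) < (M : Int)) by omega)], by simp⟩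
  have hstep : ∀ (k : Int) (st : List (List Int) × Int), 0 ≤ k → k < (N : Int) → P k st →
      P (k + 1) (countRowA graph M st k) := by
    intro k st hk0 hkN hPk
    obtain ⟨hL', hp, ha⟩ := hPk
    obtain ⟨hlenEq, hrowEq⟩ := rowLens_facts board st.1 hL'
    have hcr := countRowA_spec N M graph st.1 st.2 k hG (by omega)
      (fun t ht => by rw [hrowEq t]; exact hbr t ht) hk0 hkN
    obtain ⟨c1, c2, c3⟩ := hcr
    have hst : (st.1, st.2) = st := rfl
    rw [hst] at c1 c2 c3
    refine ⟨by rw [c1, hL'], fun i j => ?_, ?_⟩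
    · rw [c2 i j]
      by_cases hc : (i : Int) = k ∧ (j : Int) < (M : Int)
      · rw [if_pos hc, hp i j,
            if_neg (show ¬((i : Int) < k ∧ (j : Int) < (M : Int)) by omega),
            if_pos (show (i : Int) < k + 1 ∧ (j : Int) < (M : Int) by omega)]
      · rw [if_neg hc, hp i j]
        by_cases hc2 : (i : Int) < k ∧ (j : Int) < (M : Int)
        · rw [if_pos hc2, if_pos (show (i : Int) < k + 1 ∧ (j : Int) < (M : Int) by omega)]
        · rw [if_neg hc2, if_neg (show ¬((i : Int) < k + 1 ∧ (j : Int) < (M : Int)) by omega)]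
    · rw [c3, ha]
      have hrow : ∀ j ∈ Finset.range M,
          (if g2v st.1 k.toNat j + g2v graph k.toNat j > 0 then (1 : Int) else 0) =
          (if g2v board k.toNat j + g2v graph k.toNat j > 0 then (1 : Int) else 0) := by
        intro j hj
        rw [hp k.toNat j,
          if_neg (show ¬(((k.toNat : Nat) : Int) < k ∧ ((j : Nat) : Int) < (M : Int)) by omega)]
      rw [Finset.sum_congr rfl hrow]
      have hkk : (k + 1).toNat = k.toNat + 1 := by omega
      rw [hkk, Finset.sum_range_succ]
  have final := foldl_range_inv' (countRowA graph M) P 0 (N : Int) (board, 0) (by omega) h0 hstep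
  obtain ⟨_, _, f3⟩ := final
  rw [f3]
  simp

-- B's inner rectangle row: add d to cells c1..c2 of row ii
lemma rowAddB_spec (N M : Nat) (b0 b : List (List Int)) (d : Int) (ii c1 c2 : Int)
    (hLb : rowLens b = rowLens b0) (hbl : b0.length = N)
    (hbr : ∀ t : Nat, t < N → M ≤ (b0.getD t []).length)
    (hii0 : 0 ≤ ii) (hiiN : ii < (N : Int)) (hc1 : 0 ≤ c1) (hc12 : c1 ≤ c2) (hc2 : c2 < (M : Int)) :
    rowLens ((PySem.List.pyRange c1 (c2 + 1) 1).foldl (fun b j => pvAdd b ii j d) b) = rowLens b0 ∧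
    ∀ i j : Nat, g2v ((PySem.List.pyRange c1 (c2 + 1) 1).foldl (fun b j => pvAdd b ii j d) b) i j =
      g2v b i j + (if (i : Int) = ii ∧ c1 ≤ (j : Int) ∧ (j : Int) ≤ c2 then d else 0) := by
  set P : Int → List (List Int) → Prop := fun jj b' =>
    rowLens b' = rowLens b0 ∧
    ∀ i j : Nat, g2v b' i j =
      g2v b i j + (if (i : Int) = ii ∧ c1 ≤ (j : Int) ∧ (j : Int) < jj then d else 0) with hP
  have h0 : P c1 b := by
    refine ⟨hLb, fun i j => by
      rw [if_neg (show ¬((i : Int) = ii ∧ c1 ≤ (j : Int) ∧ (j : Int) < c1) by omega), add_zero]⟩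
  have hstep : ∀ (k : Int) (b' : List (List Int)), c1 ≤ k → k < c2 + 1 → P k b' →
      P (k + 1) (pvAdd b' ii k d) := by
    intro k b' hk1 hk2 hPk
    obtain ⟨hL', hp⟩ := hPk
    obtain ⟨hlenEq, hrowEq⟩ := rowLens_facts b0 b' hL'
    have hiit : ii.toNat < N := by omega
    obtain ⟨w1, w2⟩ := pvAdd_spec b' ii k d hii0 (by omega) (by omega)
      (by rw [hrowEq ii.toNat]; have := hbr ii.toNat hiit; omega)
    refine ⟨by rw [w1, hL'], fun i j => ?_⟩
    rw [w2 i j]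
    by_cases hc : i = ii.toNat ∧ j = k.toNat
    · rw [if_pos hc, hp i j,
          if_neg (show ¬((i : Int) = ii ∧ c1 ≤ (j : Int) ∧ (j : Int) < k) by omega),
          if_pos (show (i : Int) = ii ∧ c1 ≤ (j : Int) ∧ (j : Int) < k + 1 by omega)]
      ring1
    · rw [if_neg hc, hp i j]
      by_cases hc2 : (i : Int) = ii ∧ c1 ≤ (j : Int) ∧ (j : Int) < k
      · rw [if_pos hc2, if_pos (show (i : Int) = ii ∧ c1 ≤ (j : Int) ∧ (j : Int) < k + 1 by omega)]
      · rw [if_neg hc2, if_neg (show ¬((i : Int) = ii ∧ c1 ≤ (j : Int) ∧ (j : Int) < k + 1) by omega)]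
  have final := foldl_range_inv' _ P c1 (c2 + 1) b (by omega) h0 hstep
  obtain ⟨f1, f2⟩ := final
  refine ⟨f1, fun i j => ?_⟩
  rw [f2 i j]
  by_cases hc : (i : Int) = ii ∧ c1 ≤ (j : Int) ∧ (j : Int) ≤ c2
  · rw [if_pos (show (i : Int) = ii ∧ c1 ≤ (j : Int) ∧ (j : Int) < c2 + 1 by omega), if_pos hc]
  · rw [if_neg (show ¬((i : Int) = ii ∧ c1 ≤ (j : Int) ∧ (j : Int) < c2 + 1) by omega), if_neg hc]

-- B's skill step: add degree to the whole rectangle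
lemma stepB_spec (N M : Nat) (b0 b : List (List Int)) (s : List Int)
    (hLb : rowLens b = rowLens b0) (hbl : b0.length = N)
    (hbr : ∀ t : Nat, t < N → M ≤ (b0.getD t []).length) (hs : Bnd N M s) :
    rowLens (stepSkillB b s) = rowLens b0 ∧
    ∀ i j : Nat, g2v (stepSkillB b s) i j = g2v b i j + rectC s i j := by
  obtain ⟨hs1, hs13, hs3, hs2, hs24, hs4⟩ := hs
  have hb0 : PySem.List.pyGetD s 0 0 = s.getD 0 0 := PySem.List.pyGetD_zero s 0
  have hb1 : PySem.List.pyGetD s 1 0 = s.getD 1 0 := by simpa using pyGetD_n s 1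
  have hb2 : PySem.List.pyGetD s 2 0 = s.getD 2 0 := by simpa using pyGetD_n s 2
  have hb3 : PySem.List.pyGetD s 3 0 = s.getD 3 0 := by simpa using pyGetD_n s 3
  have hb4 : PySem.List.pyGetD s 4 0 = s.getD 4 0 := by simpa using pyGetD_n s 4
  have hb5 : PySem.List.pyGetD s 5 0 = s.getD 5 0 := by simpa using pyGetD_n s 5
  have hstep : stepSkillB b s =
      (PySem.List.pyRange (s.getD 1 0) (s.getD 3 0 + 1) 1).foldl (fun b i =>
        (PySem.List.pyRange (s.getD 2 0) (s.getD 4 0 + 1) 1).foldl (fun b j =>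
          pvAdd b i j (degOf s)) b) b := by
    simp only [stepSkillB, degOf, hb0, hb1, hb2, hb3, hb4, hb5]
  rw [hstep]
  set P : Int → List (List Int) → Prop := fun kk b' =>
    rowLens b' = rowLens b0 ∧
    ∀ i j : Nat, g2v b' i j = g2v b i j +
      (if s.getD 1 0 ≤ (i : Int) ∧ (i : Int) < kk ∧ s.getD 2 0 ≤ (j : Int) ∧ (j : Int) ≤ s.getD 4 0
        then degOf s else 0) with hP
  have h0 : P (s.getD 1 0) b := by
    refine ⟨hLb, fun i j => by
      rw [if_neg (show ¬(s.getD 1 0 ≤ (i : Int) ∧ (i : Int) < s.getD 1 0 ∧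
        s.getD 2 0 ≤ (j : Int) ∧ (j : Int) ≤ s.getD 4 0) by omega), add_zero]⟩
  have hstep2 : ∀ (k : Int) (b' : List (List Int)), s.getD 1 0 ≤ k → k < s.getD 3 0 + 1 → P k b' →
      P (k + 1) ((PySem.List.pyRange (s.getD 2 0) (s.getD 4 0 + 1) 1).foldl (fun b j =>
        pvAdd b k j (degOf s)) b') := by
    intro k b' hk1 hk2 hPk
    obtain ⟨hL', hp⟩ := hPk
    obtain ⟨w1, w2⟩ := rowAddB_spec N M b0 b' (degOf s) k (s.getD 2 0) (s.getD 4 0)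
      hL' hbl hbr (by omega) (by omega) hs2 hs24 hs4
    refine ⟨w1, fun i j => ?_⟩
    rw [w2 i j, hp i j]
    by_cases hc1 : s.getD 1 0 ≤ (i : Int) ∧ (i : Int) < k ∧ s.getD 2 0 ≤ (j : Int) ∧ (j : Int) ≤ s.getD 4 0
    · rw [if_pos hc1,
          if_neg (show ¬((i : Int) = k ∧ s.getD 2 0 ≤ (j : Int) ∧ (j : Int) ≤ s.getD 4 0) by omega),
          if_pos (show s.getD 1 0 ≤ (i : Int) ∧ (i : Int) < k + 1 ∧ s.getD 2 0 ≤ (j : Int) ∧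
            (j : Int) ≤ s.getD 4 0 by omega)]
      ring1
    · rw [if_neg hc1]
      by_cases hc2 : (i : Int) = k ∧ s.getD 2 0 ≤ (j : Int) ∧ (j : Int) ≤ s.getD 4 0
      · rw [if_pos hc2,
          if_pos (show s.getD 1 0 ≤ (i : Int) ∧ (i : Int) < k + 1 ∧ s.getD 2 0 ≤ (j : Int) ∧
            (j : Int) ≤ s.getD 4 0 by omega)]
        ring1
      · rw [if_neg hc2,
          if_neg (show ¬(s.getD 1 0 ≤ (i : Int) ∧ (i : Int) < k + 1 ∧ s.getD 2 0 ≤ (j : Int) ∧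
            (j : Int) ≤ s.getD 4 0) by omega)]
        ring1
  have final := foldl_range_inv' _ P (s.getD 1 0) (s.getD 3 0 + 1) b (by omega) h0 hstep2
  obtain ⟨f1, f2⟩ := final
  refine ⟨f1, fun i j => ?_⟩
  rw [f2 i j]
  unfold rectC
  split_ifs <;> omega

-- B's skill loop
lemma skillsB_spec (N M : Nat) (b0 : List (List Int)) (sk : List (List Int))
    (hbl : b0.length = N) (hbr : ∀ t : Nat, t < N → M ≤ (b0.getD t []).length) :
    ∀ b : List (List Int), rowLens b = rowLens b0 → (∀ s ∈ sk, Bnd N M s) →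
      rowLens (sk.foldl stepSkillB b) = rowLens b0 ∧
      ∀ i j : Nat, g2v (sk.foldl stepSkillB b) i j = g2v b i j + deltaOf sk i j := by
  induction sk with
  | nil => intro b hLb _; exact ⟨hLb, fun i j => by simp [deltaOf]⟩
  | cons s tl ih =>
    intro b hLb hB
    obtain ⟨h1, h2⟩ := stepB_spec N M b0 b s hLb hbl hbr (hB s (by simp))
    obtain ⟨h3, h4⟩ := ih (stepSkillB b s) h1 (fun x hx => hB x (by simp [hx]))
    refine ⟨h3, fun i j => ?_⟩
    simp only [List.foldl_cons]
    rw [h4 i j, h2 i j]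
    simp only [deltaOf, List.map_cons, List.sum_cons]
    ring1

-- B's counting scan
lemma countB_spec (N M : Nat) (b : List (List Int))
    (hbl : b.length = N) (hbr : ∀ t : Nat, t < N → M ≤ (b.getD t []).length) :
    ((PySem.List.pyRange 0 (N : Int) 1).foldl (fun a i =>
      (PySem.List.pyRange 0 (M : Int) 1).foldl (fun a j => if pvAt b i j > 0 then a + 1 else a) a) 0) =
      ∑ i ∈ Finset.range N, ∑ j ∈ Finset.range M, (if g2v b i j > 0 then (1 : Int) else 0) := by
  have inner : ∀ (ii : Int), 0 ≤ ii → ii < (N : Int) → ∀ (a : Int),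
      (PySem.List.pyRange 0 (M : Int) 1).foldl (fun a j => if pvAt b ii j > 0 then a + 1 else a) a =
      a + ∑ j ∈ Finset.range M, (if g2v b ii.toNat j > 0 then (1 : Int) else 0) := by
    intro ii h0 hN a
    have final := foldl_range_inv' (fun a j => if pvAt b ii j > 0 then a + 1 else a)
      (fun jj a' => a' = a + ∑ j ∈ Finset.range jj.toNat, (if g2v b ii.toNat j > 0 then (1 : Int) else 0))
      0 (M : Int) a (by omega) (by simp)
      (by
        intro k a' hk0 hkM ha'
        simp only [] at ha' ⊢
        have hread : pvAt b ii k = g2v b ii.toNat k.toNat :=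
          pvAt_spec b ii k h0 (by omega) hk0 (by have := hbr ii.toNat (by omega); omega)
        rw [hread, ha']
        have hkk : (k + 1).toNat = k.toNat + 1 := by omega
        rw [hkk, Finset.sum_range_succ]
        split_ifs <;> ring1)
    rw [final]
    simp
  have final := foldl_range_inv' (fun a i =>
      (PySem.List.pyRange 0 (M : Int) 1).foldl (fun a j => if pvAt b i j > 0 then a + 1 else a) a)
    (fun ii a' => a' = ∑ i ∈ Finset.range ii.toNat, ∑ j ∈ Finset.range M,
      (if g2v b i j > 0 then (1 : Int) else 0))
    0 (N : Int) 0 (by omega) (by simp)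
    (by
      intro k a' hk0 hkN ha'
      simp only [] at ha' ⊢
      rw [inner k hk0 hkN a', ha']
      have hkk : (k + 1).toNat = k.toNat + 1 := by omega
      rw [hkk, Finset.sum_range_succ])
  rw [final]
  simp

-- double prefix sums of the four corner updates give the rectangle indicator
lemma corn_prefix (N M : Nat) (s : List Int) (hs : Bnd N M s) (i j : Nat) :
    (∑ t ∈ Finset.range (i + 1), ∑ u ∈ Finset.range (j + 1), cornC s t u) = rectC s i j := by
  obtain ⟨h1, h13, h3, h2, h24, h4⟩ := hs
  have e2sum : (∑ u ∈ Finset.range (j + 1), e2C s u) =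
      (if 0 ≤ s.getD 2 0 ∧ s.getD 2 0 < (j : Int) + 1 then (1 : Int) else 0)
        - (if 0 ≤ s.getD 4 0 + 1 ∧ s.getD 4 0 + 1 < (j : Int) + 1 then (1 : Int) else 0) := by
    unfold e2C
    rw [Finset.sum_sub_distrib, sum_ind, sum_ind]
    have hcast : ((j + 1 : Nat) : Int) = (j : Int) + 1 := by push_cast; ring
    rw [hcast]
  have e1sum : (∑ t ∈ Finset.range (i + 1), e1C s t) =
      (if 0 ≤ s.getD 1 0 ∧ s.getD 1 0 < (i : Int) + 1 then (1 : Int) else 0)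
        - (if 0 ≤ s.getD 3 0 + 1 ∧ s.getD 3 0 + 1 < (i : Int) + 1 then (1 : Int) else 0) := by
    unfold e1C
    rw [Finset.sum_sub_distrib, sum_ind, sum_ind]
    have hcast : ((i + 1 : Nat) : Int) = (i : Int) + 1 := by push_cast; ring
    rw [hcast]
  have inner : ∀ t : Nat, (∑ u ∈ Finset.range (j + 1), cornC s t u) =
      degOf s * e1C s t * ((if 0 ≤ s.getD 2 0 ∧ s.getD 2 0 < (j : Int) + 1 then (1 : Int) else 0)
        - (if 0 ≤ s.getD 4 0 + 1 ∧ s.getD 4 0 + 1 < (j : Int) + 1 then (1 : Int) else 0)) := by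
    intro t
    unfold cornC
    rw [← Finset.mul_sum, e2sum]
  rw [Finset.sum_congr rfl (fun t _ => inner t)]
  have pull : (∑ t ∈ Finset.range (i + 1), degOf s * e1C s t *
      ((if 0 ≤ s.getD 2 0 ∧ s.getD 2 0 < (j : Int) + 1 then (1 : Int) else 0)
        - (if 0 ≤ s.getD 4 0 + 1 ∧ s.getD 4 0 + 1 < (j : Int) + 1 then (1 : Int) else 0))) =
      degOf s * ((if 0 ≤ s.getD 2 0 ∧ s.getD 2 0 < (j : Int) + 1 then (1 : Int) else 0)
        - (if 0 ≤ s.getD 4 0 + 1 ∧ s.getD 4 0 + 1 < (j : Int) + 1 then (1 : Int) else 0)) *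
      (∑ t ∈ Finset.range (i + 1), e1C s t) := by
    rw [Finset.mul_sum]
    exact Finset.sum_congr rfl (fun t _ => by ring1)
  rw [pull, e1sum]
  unfold rectC
  split_ifs <;> omega

-- ===== VERDICT (by name: the statement is the Claim_ definition above) =====
theorem solution_spec : Claim_equal_solution := by
  intro board skill _hDom hPre
  obtain ⟨hne, hrows, hsk⟩ := hPre
  show solution board skill = solution_alt board skill
  have hM0 : PySem.List.pyGetD board 0 [] = board.getD 0 [] := PySem.List.pyGetD_zero board []
  have hbr : ∀ t : Nat, t < board.length → (board.getD 0 []).length ≤ (board.getD t []).length := by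
    intro t ht
    have hmem : board.getD t [] ∈ board := by
      rw [List.getD_eq_getElem board [] ht]
      exact List.getElem_mem ht
    have h := hrows _ hmem
    rwa [headD_eq_getD] at h
  have hB : ∀ s ∈ skill, Bnd board.length (board.getD 0 []).length s := by
    intro s hsmem
    obtain ⟨_, a1, a2, a3, a4, a5, a6⟩ := hsk s hsmem
    rw [headD_eq_getD] at a6
    exact ⟨a1, a2, a3, a4, a5, a6⟩
  simp only [solution, solution_alt]
  rw [hM0]
  set G0 := List.replicate (board.length + 1)
    (List.replicate ((board.getD 0 []).length + 1) (0 : Int)) with hG0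
  set G1 := skill.foldl stepSkillA G0 with hG1
  set G2 := (PySem.List.pyRange 0 ((board.length : Int) + 1) 1).foldl
    (rowPass (board.getD 0 []).length) G1 with hG2
  set G3 := (PySem.List.pyRange 0 (((board.getD 0 []).length : Int) + 1) 1).foldl
    (colPass board.length) G2 with hG3
  set BF := skill.foldl stepSkillB board with hBF
  -- zero grid
  have hz : ∀ i j : Nat, g2v G0 i j = 0 := by
    intro i j
    simp only [g2v, hG0, List.getD, List.getElem?_replicate]
    by_cases h : i < board.length + 1
    · by_cases h2 : j < (board.getD 0 []).length + 1 <;> simp [h, h2]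
    · simp [h]
  have hL0 : rowLens G0 = List.replicate (board.length + 1) ((board.getD 0 []).length + 1) := by
    simp [hG0, rowLens]
  obtain ⟨hL1, hP1⟩ := skillsA_spec board.length (board.getD 0 []).length skill G0 hL0 hB
  rw [← hG1] at hL1 hP1
  obtain ⟨hL2, hP2⟩ := rowPassFold_spec board.length (board.getD 0 []).length G1 hL1
  rw [← hG2] at hL2 hP2
  obtain ⟨hL3, hP3⟩ := colPassFold_spec board.length (board.getD 0 []).length G2 hL2
  rw [← hG3] at hL3 hP3
  have hg3 : ∀ i j : Nat, i < board.length → j < (board.getD 0 []).length →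
      g2v G3 i j = deltaOf skill i j := by
    intro i j hi hj
    rw [hP3 i j (by omega) (by omega)]
    rw [Finset.sum_congr rfl (fun t ht =>
      hP2 t j (by have := Finset.mem_range.mp ht; omega) (by omega))]
    rw [Finset.sum_congr rfl (fun t _ => Finset.sum_congr rfl (fun u _ => by
      rw [hP1 t u, hz t u, zero_add]))]
    have swap1 : ∀ t : Nat, (∑ u ∈ Finset.range (j + 1), cornOf skill t u) =
        (skill.map (fun s => ∑ u ∈ Finset.range (j + 1), cornC s t u)).sum := by
      intro t
      exact list_sum_swap skill (fun s u => cornC s t u) (j + 1)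
    rw [Finset.sum_congr rfl (fun t _ => swap1 t)]
    rw [list_sum_swap skill (fun s t => ∑ u ∈ Finset.range (j + 1), cornC s t u) (i + 1)]
    unfold deltaOf
    rw [List.map_congr_left (fun s hsm =>
      corn_prefix board.length (board.getD 0 []).length s (hB s hsm) i j)]
  -- B facts
  obtain ⟨hLB, hPB⟩ := skillsB_spec board.length (board.getD 0 []).length board skill rfl hbr board rfl hB
  rw [← hBF] at hLB hPB
  obtain ⟨hlenB, hrowBf⟩ := rowLens_facts board BF hLB
  have hmB : (PySem.List.pyGetD BF 0 []).length = (board.getD 0 []).length := by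
    rw [PySem.List.pyGetD_zero, hrowBf 0]
  rw [hlenB, hmB]
  rw [countA_spec board.length (board.getD 0 []).length G3 board hL3 rfl hbr]
  rw [countB_spec board.length (board.getD 0 []).length BF hlenB
    (fun t ht => by rw [hrowBf t]; exact hbr t ht)]
  refine Finset.sum_congr rfl (fun i hi => Finset.sum_congr rfl (fun j hj => ?_))
  rw [hg3 i j (Finset.mem_range.mp hi) (Finset.mem_range.mp hj), hPB i j]
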